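-- pv_equiv track=rewrite | github.com/epfl-ada/ada-2024-project-teamcsx24 | src/scripts/scriptculture.py | count_us_terms
-- ===== SOURCE A (Python) =====
-- def count_us_terms(summary):       #Example of US related terms
--     us_terms = [
--         "America", "United States", "US", "U.S.", "American", "New York",
--         "Los Angeles", "California", "Washington D.C.", "Hollywood",
--         "East Coast", "West Coast", "Midwest", "Southern", "American Dream",
--         "FBI", "CIA", "White House", "Capitol Hill", "Congress", "President",
--         "Independence", "Patriot", "Yankee", "Route 66"
--     ]
--
--     words = summary.split()
--     return sum(1 for word in words if word in us_terms)
-- ===== SOURCE B (Python) =====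
-- def count_us_terms(summary):
--     us_terms = ("America|United States|US|U.S.|American|New York|"
--                 "Los Angeles|California|Washington D.C.|Hollywood|"
--                 "East Coast|West Coast|Midwest|Southern|American Dream|"
--                 "FBI|CIA|White House|Capitol Hill|Congress|President|"
--                 "Independence|Patriot|Yankee|Route 66").split("|")
--     words = summary.split()
--     total = 0
--     for term in us_terms:
--         total += words.count(term)
--     return total
-- ===== Notes on version B (the rewrite author's own statement) =====
-- stated objective: alternative
-- what changed: B reverses the traversal: it builds the term list by splitting one pipe-joined string constant and, for each of the 25 terms, accumulates that term's occurrence count in the split word list via words.count(term), instead of testing each word for membership in the term list.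
import Mathlib
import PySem

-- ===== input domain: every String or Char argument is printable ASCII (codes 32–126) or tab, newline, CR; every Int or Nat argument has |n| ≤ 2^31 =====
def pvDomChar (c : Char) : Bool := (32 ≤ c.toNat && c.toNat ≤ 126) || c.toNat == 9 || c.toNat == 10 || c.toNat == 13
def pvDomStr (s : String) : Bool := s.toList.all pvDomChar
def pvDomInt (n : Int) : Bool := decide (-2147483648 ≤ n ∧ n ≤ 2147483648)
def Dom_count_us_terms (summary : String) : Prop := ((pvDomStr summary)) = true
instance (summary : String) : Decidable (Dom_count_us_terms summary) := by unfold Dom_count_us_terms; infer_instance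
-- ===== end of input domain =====

-- B reverses the traversal: instead of scanning the term list for every word, it
-- counts each of the 25 terms' occurrences in the word list (alternative decomposition).

-- ===== PORT A =====
def usTermsA : List String :=
  ["America", "United States", "US", "U.S.", "American", "New York",
   "Los Angeles", "California", "Washington D.C.", "Hollywood",
   "East Coast", "West Coast", "Midwest", "Southern", "American Dream",
   "FBI", "CIA", "White House", "Capitol Hill", "Congress", "President",
   "Independence", "Patriot", "Yankee", "Route 66"]

def count_us_terms (summary : String) : Int :=
  let words := PySem.Str.split₀ summary
  ((words.map (fun word => if word ∈ usTermsA then (1 : Int) else 0)).sum)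

-- ===== PORT B =====
def usTermsStrB : String :=
  "America|United States|US|U.S.|American|New York|" ++
  "Los Angeles|California|Washington D.C.|Hollywood|" ++
  "East Coast|West Coast|Midwest|Southern|American Dream|" ++
  "FBI|CIA|White House|Capitol Hill|Congress|President|" ++
  "Independence|Patriot|Yankee|Route 66"

def count_us_terms_alt (summary : String) : Int :=
  -- `.split("|")`: sep is non-empty, so split? returns some; getD only makes the match total
  let us_terms := (PySem.Str.split? usTermsStrB "|").getD []
  let words := PySem.Str.split₀ summary
  us_terms.foldl (fun total term => total + (PySem.List.count words term : Int)) 0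

-- ===== PRECONDITION & SPEC =====
def Spec_count_us_terms (summary : String) (out : Int) : Prop := out = count_us_terms_alt summary
instance (summary : String) (out : Int) : Decidable (Spec_count_us_terms summary out) := by unfold Spec_count_us_terms; infer_instance

-- ===== CLAIM (what is proved, stated in full; the proofs are below) =====
def Claim_equal_count_us_terms : Prop := ∀ (summary : String), Dom_count_us_terms summary → Spec_count_us_terms summary (count_us_terms summary)

-- ===== LEMMAS AND PROOFS =====

-- B's split term string yields exactly A's term list
set_option maxRecDepth 8000 in
theorem splitOn_terms : (PySem.Str.split? usTermsStrB "|").getD [] = usTermsA := by decide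

-- foldl-accumulated per-term counts are the sum of counts
theorem foldl_count_eq_sum (terms : List String) (ws : List String) (a : Int) :
    terms.foldl (fun total term => total + (List.count term ws : Int)) a =
    a + ((terms.map (fun t => (List.count t ws : Int))).sum) := by
  induction terms generalizing a with
  | nil => simp
  | cons t ts ih =>
    rw [List.foldl_cons, ih]
    simp only [List.map_cons, List.sum_cons]
    ring

-- for a duplicate-free term list, singleton-word case
theorem sum_count_singleton (terms : List String) (hnd : terms.Nodup) (w : String) :
    ((terms.map (fun t => (List.count t [w] : Int))).sum) =
    (if w ∈ terms then (1 : Int) else 0) := by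
  induction terms with
  | nil => simp
  | cons t ts ih =>
    simp only [List.nodup_cons] at hnd
    simp only [List.map_cons, List.sum_cons, List.mem_cons, ih hnd.2]
    by_cases htw : t = w
    · subst htw
      simp [if_neg hnd.1]
    · simp [Ne.symm htw]

theorem sum_count_cons (terms : List String) (w : String) (ws : List String) :
    ((terms.map (fun t => (List.count t (w :: ws) : Int))).sum) =
    ((terms.map (fun t => (List.count t [w] : Int))).sum) +
    ((terms.map (fun t => (List.count t ws : Int))).sum) := by
  induction terms with
  | nil => simp
  | cons t ts ih =>
    simp only [List.map_cons, List.sum_cons, ih]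
    have h : List.count t (w :: ws) = List.count t [w] + List.count t ws := by
      simp [List.count_cons]; omega
    rw [h]; push_cast; ring

-- summing per-term occurrence counts = summing per-word membership indicators
theorem sum_count_words (terms : List String) (hnd : terms.Nodup) (ws : List String) :
    ((terms.map (fun t => (List.count t ws : Int))).sum) =
    ((ws.map (fun w => if w ∈ terms then (1 : Int) else 0)).sum) := by
  induction ws with
  | nil => simp
  | cons w ws ih =>
    rw [sum_count_cons, sum_count_singleton terms hnd w, ih]
    simp [List.map_cons, List.sum_cons]

theorem count_us_terms_spec_aux (summary : String) :
    count_us_terms summary = count_us_terms_alt summary := by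
  unfold count_us_terms count_us_terms_alt
  simp only [PySem.List.count_eq]
  rw [splitOn_terms, foldl_count_eq_sum, zero_add,
      sum_count_words usTermsA (by decide) (PySem.Str.split₀ summary)]

-- ===== VERDICT (by name: the statement is the Claim_ definition above) =====
theorem count_us_terms_spec : Claim_equal_count_us_terms := by
  intro summary _
  exact count_us_terms_spec_aux summary
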